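-- pv_equiv track=rewrite | github.com/django/django | tests/.venv/lib/python3.12/site-packages/black/trans.py | _toggle_fexpr_quotes
-- ===== SOURCE A (Python) =====
-- from collections.abc import Callable, Collection, Iterable, Iterator, Sequence
--
-- def iter_fexpr_spans(s: str) -> Iterator[tuple[int, int]]:
--     """
--     Yields spans corresponding to expressions in a given f-string.
--     Spans are half-open ranges (left inclusive, right exclusive).
--     Assumes the input string is a valid f-string, but will not crash if the input
--     string is invalid.
--     """
--     stack: list[int] = []  # our curly paren stack
--     i = 0
--     while i < len(s):
--         if s[i] == "{":
--             # if we're in a string part of the f-string, ignore escaped curly braces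
--             if not stack and i + 1 < len(s) and s[i + 1] == "{":
--                 i += 2
--                 continue
--             stack.append(i)
--             i += 1
--             continue
--
--         if s[i] == "}":
--             if not stack:
--                 i += 1
--                 continue
--             j = stack.pop()
--             # we've made it back out of the expression! yield the span
--             if not stack:
--                 yield (j, i + 1)
--             i += 1
--             continue
--
--         # if we're in an expression part of the f-string, fast-forward through strings
--         # note that backslashes are not legal in the expression portion of f-strings
--         if stack:
--             delim = None
--             if s[i : i + 3] in ("'''", '"""'):
--                 delim = s[i : i + 3]
--             elif s[i] in ("'", '"'):
--                 delim = s[i]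
--             if delim:
--                 i += len(delim)
--                 while i < len(s) and s[i : i + len(delim)] != delim:
--                     i += 1
--                 i += len(delim)
--                 continue
--         i += 1
--
-- def _toggle_fexpr_quotes(fstring: str, old_quote: str) -> str:
--     """
--     Toggles quotes used in f-string expressions that are `old_quote`.
--
--     f-string expressions can't contain backslashes, so we need to toggle the
--     quotes if the f-string itself will end up using the same quote. We can
--     simply toggle without escaping because, quotes can't be reused in f-string
--     expressions. They will fail to parse.
--
--     NOTE: If PEP 701 is accepted, above statement will no longer be true.
--     Though if quotes can be reused, we can simply reuse them without updates or
--     escaping, once Black figures out how to parse the new grammar.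
--     """
--     new_quote = "'" if old_quote == '"' else '"'
--     parts = []
--     previous_index = 0
--     for start, end in iter_fexpr_spans(fstring):
--         parts.append(fstring[previous_index:start])
--         parts.append(fstring[start:end].replace(old_quote, new_quote))
--         previous_index = end
--     parts.append(fstring[previous_index:])
--     return "".join(parts)
-- ===== SOURCE B (Python) =====
-- def _skip_expr(s, i):
--     """Recursive descent: i points just after an opening '{'. Returns the index
--     just past the matching '}', or None if the expression never closes."""
--     n = len(s)
--     while i < n:
--         c = s[i]
--         if c == "}":
--             return i + 1
--         if c == "{":
--             j = _skip_expr(s, i + 1)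
--             if j is None:
--                 return None
--             i = j
--         elif c in ("'", '"'):
--             delim = s[i:i + 3] if s[i:i + 3] in ("'''", '"""') else c
--             i += len(delim)
--             while i < n and s[i:i + len(delim)] != delim:
--                 i += 1
--             i += len(delim)
--         else:
--             i += 1
--     return None
--
--
-- def _toggle_fexpr_quotes(fstring, old_quote):
--     new_quote = "'" if old_quote == '"' else '"'
--     s = fstring
--     n = len(s)
--     out = []
--     seg = 0
--     i = 0
--     while i < n:
--         if s[i] == "{":
--             if i + 1 < n and s[i + 1] == "{":
--                 i += 2
--                 continue
--             end = _skip_expr(s, i + 1)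
--             if end is None:
--                 break  # unterminated expression: rest of the string is verbatim
--             out.append(s[seg:i])
--             out.append(s[i:end].replace(old_quote, new_quote))
--             seg = i = end
--         else:
--             i += 1
--     out.append(s[seg:])
--     return "".join(out)
-- ===== Notes on version B (the rewrite author's own statement) =====
-- stated objective: alternative
-- what changed: Replaces A's iterative stack-machine span generator (explicit index stack driving iter_fexpr_spans) plus a fold over yielded spans by a recursive-descent parser: a recursive _skip_expr that matches each brace level by recursion on nesting, driven by a top-level emitter loop.
import Mathlib
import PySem

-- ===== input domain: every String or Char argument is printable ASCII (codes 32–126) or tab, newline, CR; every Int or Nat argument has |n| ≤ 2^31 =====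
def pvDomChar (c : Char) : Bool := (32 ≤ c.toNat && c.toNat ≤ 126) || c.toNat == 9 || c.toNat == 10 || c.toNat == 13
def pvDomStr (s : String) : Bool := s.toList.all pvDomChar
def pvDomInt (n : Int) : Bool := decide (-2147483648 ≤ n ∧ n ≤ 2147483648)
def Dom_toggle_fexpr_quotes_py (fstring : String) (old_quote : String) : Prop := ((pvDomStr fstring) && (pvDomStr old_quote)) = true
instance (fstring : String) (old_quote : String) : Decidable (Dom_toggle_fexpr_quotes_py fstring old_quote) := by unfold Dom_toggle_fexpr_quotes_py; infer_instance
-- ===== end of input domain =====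

-- B replaces A's iterative stack-machine span generator + fold-over-spans by a recursive-descent
-- parser: a recursive expression skipper (recursion on brace nesting) driven by a top-level
-- emitter (objective: alternative).

-- ===== PORT A =====
-- 'while i < len(s) and s[i:i+len(delim)] != delim: i += 1' — the string fast-forward inner
-- loop (used by A's generator and by B's recursive skipper, both Pythons contain it verbatim);
-- returns i after the loop. The fuel argument only makes the recursion structural; every call
-- receives fuel ≥ s.length - i, so the 0 case is never the one that stops the loop.
def pvFfwd (s delim : List Char) : Nat → Nat → Nat
  | 0, i => i
  | fuel + 1, i =>
    if i < s.length then
      if (s.drop i).take delim.length = delim then i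
      else pvFfwd s delim fuel (i + 1)
    else i

-- iter_fexpr_spans: stack of indices (Python append/pop = cons/head), yields in order;
-- fuel counts outer iterations (i advances by ≥ 1 each time), initial fuel s.length + 1 ≥ enough
def pvSpansAux (s : List Char) : Nat → Nat → List Nat → List (Nat × Nat)
  | 0, _, _ => []
  | fuel + 1, i, stack =>
    if h : i < s.length then
      if s[i] = '{' then
        if stack = [] ∧ s[i+1]? = some '{' then pvSpansAux s fuel (i + 2) stack
        else pvSpansAux s fuel (i + 1) (i :: stack)
      else if s[i] = '}' then
        match stack with
        | [] => pvSpansAux s fuel (i + 1) []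
        | j :: rest =>
            if rest = [] then (j, i + 1) :: pvSpansAux s fuel (i + 1) rest
            else pvSpansAux s fuel (i + 1) rest
      else if stack ≠ [] then
        if (s.drop i).take 3 = ['\'', '\'', '\''] ∨ (s.drop i).take 3 = ['"', '"', '"'] then
          pvSpansAux s fuel (pvFfwd s ((s.drop i).take 3) fuel (i + 3) + 3) stack
        else if s[i] = '\'' ∨ s[i] = '"' then
          pvSpansAux s fuel (pvFfwd s [s[i]] fuel (i + 1) + 1) stack
        else pvSpansAux s fuel (i + 1) stack
      else pvSpansAux s fuel (i + 1) stack
    else []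

def toggle_fexpr_quotes_py (fstring : String) (old_quote : String) : String :=
  let new_quote : String := if old_quote = "\"" then "'" else "\""
  let s := fstring.toList
  let r := (pvSpansAux s (s.length + 1) 0 []).foldl
    (fun (acc : List (List Char) × Nat) (sp : Nat × Nat) =>
      (acc.1 ++ [PySem.List.slice s (some (acc.2 : Int)) (some (sp.1 : Int)),
                 PySem.Chars.replace (PySem.List.slice s (some (sp.1 : Int)) (some (sp.2 : Int)))
                   old_quote.toList new_quote.toList],
       sp.2))
    ([], 0)
  String.ofList (PySem.Chars.join [] (r.1 ++ [PySem.List.slice s (some (r.2 : Int)) none]))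

-- ===== PORT B =====
-- _skip_expr: recursive descent over brace nesting; i points just after '{'; returns the index
-- past the matching '}' (none = unterminated). Fuel makes the recursion structural.
def pvSkipB (s : List Char) : Nat → Nat → Option Nat
  | 0, _ => none
  | fuel + 1, i =>
    if h : i < s.length then
      if s[i] = '}' then some (i + 1)
      else if s[i] = '{' then
        match pvSkipB s fuel (i + 1) with
        | none => none
        | some j => pvSkipB s fuel j
      else if s[i] = '\'' ∨ s[i] = '"' then
        let delim := if (s.drop i).take 3 = ['\'', '\'', '\''] ∨ (s.drop i).take 3 = ['"', '"', '"']
          then (s.drop i).take 3 else [s[i]]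
        pvSkipB s fuel (pvFfwd s delim fuel (i + delim.length) + delim.length)
      else pvSkipB s fuel (i + 1)
    else none

-- the top-level while loop of B's _toggle_fexpr_quotes
def pvEmitB (s oq nq : List Char) : Nat → Nat → Nat → List (List Char) → List (List Char)
  | 0, _, seg, out => out ++ [PySem.List.slice s (some (seg : Int)) none]
  | fuel + 1, i, seg, out =>
    if h : i < s.length then
      if s[i] = '{' then
        if s[i+1]? = some '{' then pvEmitB s oq nq fuel (i + 2) seg out
        else match pvSkipB s fuel (i + 1) with
          | none => out ++ [PySem.List.slice s (some (seg : Int)) none]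
          | some e => pvEmitB s oq nq fuel e e
              (out ++ [PySem.List.slice s (some (seg : Int)) (some (i : Int)),
                       PySem.Chars.replace (PySem.List.slice s (some (i : Int)) (some (e : Int))) oq nq])
      else pvEmitB s oq nq fuel (i + 1) seg out
    else out ++ [PySem.List.slice s (some (seg : Int)) none]

def toggle_fexpr_quotes_py_alt (fstring : String) (old_quote : String) : String :=
  let new_quote : String := if old_quote = "\"" then "'" else "\""
  String.ofList (PySem.Chars.join []
    (pvEmitB fstring.toList old_quote.toList new_quote.toList (fstring.toList.length + 1) 0 0 []))

-- ===== PRECONDITION & SPEC =====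
def Spec_toggle_fexpr_quotes_py (fstring : String) (old_quote : String) (out : String) : Prop := out = toggle_fexpr_quotes_py_alt fstring old_quote
instance (fstring : String) (old_quote : String) (out : String) : Decidable (Spec_toggle_fexpr_quotes_py fstring old_quote out) := by unfold Spec_toggle_fexpr_quotes_py; infer_instance

-- ===== CLAIM (what is proved, stated in full; the proofs are below) =====
def Claim_equal_toggle_fexpr_quotes_py : Prop := ∀ (fstring : String) (old_quote : String), Dom_toggle_fexpr_quotes_py fstring old_quote → Spec_toggle_fexpr_quotes_py fstring old_quote (toggle_fexpr_quotes_py fstring old_quote)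

-- ===== LEMMAS AND PROOFS =====

-- the list of parts A's fold produces from a span list, written recursively
def pvBuild (s oq nq : List Char) : Nat → List (Nat × Nat) → List (List Char)
  | prev, [] => [PySem.List.slice s (some (prev : Int)) none]
  | prev, (a, b) :: rest =>
      PySem.List.slice s (some (prev : Int)) (some (a : Int)) ::
      PySem.Chars.replace (PySem.List.slice s (some (a : Int)) (some (b : Int))) oq nq ::
      pvBuild s oq nq b rest

theorem pvFold_eq_build (s oq nq : List Char) (spans : List (Nat × Nat)) :
    ∀ (acc : List (List Char)) (prev : Nat),
    (let r := spans.foldl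
      (fun (acc : List (List Char) × Nat) (sp : Nat × Nat) =>
        (acc.1 ++ [PySem.List.slice s (some (acc.2 : Int)) (some (sp.1 : Int)),
                   PySem.Chars.replace (PySem.List.slice s (some (sp.1 : Int)) (some (sp.2 : Int))) oq nq],
         sp.2)) (acc, prev)
     r.1 ++ [PySem.List.slice s (some (r.2 : Int)) none]) = acc ++ pvBuild s oq nq prev spans := by
  induction spans with
  | nil => intro acc prev; simp [pvBuild]
  | cons sp rest ih =>
      intro acc prev
      obtain ⟨a, b⟩ := sp
      simp only [List.foldl_cons]
      rw [ih]
      simp [pvBuild]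

-- head of a 3-character slice
theorem pvTake3_head (s : List Char) (i : Nat) (hi : i < s.length) (a b c : Char)
    (heq : (s.drop i).take 3 = [a, b, c]) : s[i] = a := by
  have h1 := congrArg (fun l => l[0]?) heq
  simp only [List.getElem?_take, List.getElem?_drop] at h1
  simp at h1
  rw [List.getElem?_eq_getElem hi] at h1
  exact Option.some.inj h1

theorem pvFfwd_ge (s d : List Char) : ∀ (f i : Nat), i ≤ pvFfwd s d f i := by
  intro f
  induction f with
  | zero => intro i; simp [pvFfwd]
  | succ f ih =>
      intro i
      rw [pvFfwd]
      split_ifs with h1 h2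
      · exact le_refl i
      · exact le_trans (Nat.le_succ i) (ih (i + 1))
      · exact le_refl i

theorem pvFfwd_of_ge (s d : List Char) (f i : Nat) (h : ¬ i < s.length) :
    pvFfwd s d f i = i := by
  cases f <;> simp [pvFfwd, h]

theorem pvFfwd_stable (s d : List Char) : ∀ (f g i : Nat),
    s.length ≤ f + i → s.length ≤ g + i → pvFfwd s d f i = pvFfwd s d g i := by
  intro f
  induction f with
  | zero =>
      intro g i hf hg
      have : ¬ i < s.length := by omega
      rw [pvFfwd_of_ge s d 0 i this, pvFfwd_of_ge s d g i this]
  | succ f ih =>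
      intro g i hf hg
      by_cases hi : i < s.length
      · obtain ⟨g', rfl⟩ : ∃ g', g = g' + 1 := ⟨g - 1, by omega⟩
        rw [pvFfwd, pvFfwd]
        split_ifs with h2
        · rfl
        · exact ih g' (i + 1) (by omega) (by omega)
      · rw [pvFfwd_of_ge s d _ i hi, pvFfwd_of_ge s d g i hi]

theorem pvSkipB_of_ge (s : List Char) (f i : Nat) (h : ¬ i < s.length) :
    pvSkipB s f i = none := by
  cases f <;> simp [pvSkipB, h]

theorem pvSpansAux_of_ge (s : List Char) (f i : Nat) (st : List Nat) (h : ¬ i < s.length) :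
    pvSpansAux s f i st = [] := by
  cases f <;> simp [pvSpansAux, h]

theorem pvSkipB_gt (s : List Char) : ∀ (f i j : Nat), pvSkipB s f i = some j → i < j := by
  intro f
  induction f with
  | zero => intro i j h; simp [pvSkipB] at h
  | succ f ih =>
      intro i j h
      rw [pvSkipB] at h
      by_cases hi : i < s.length
      · simp only [dif_pos hi] at h
        split_ifs at h with h1 h2 h3 h4
        · injection h with h; omega
        · cases hm : pvSkipB s f (i + 1) with
          | none => rw [hm] at h; simp at h
          | some j' =>
              rw [hm] at h
              have h1' := ih (i + 1) j' hm
              have h2' := ih j' j h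
              omega
        · have h5 := ih _ j h
          have hge := pvFfwd_ge s ((s.drop i).take 3) f (i + ((s.drop i).take 3).length)
          have hl : 1 ≤ ((s.drop i).take 3).length := by
            rcases h4 with hh | hh <;> simp [hh]
          omega
        · have h5 := ih _ j h
          have hge := pvFfwd_ge s [s[i]] f (i + [s[i]].length)
          have hl : [s[i]].length = 1 := by simp
          omega
        · have := ih (i + 1) j h
          omega
      · simp [hi] at h

theorem pvSkipB_stable (s : List Char) : ∀ (f g i : Nat),
    s.length < f + i → s.length < g + i → pvSkipB s f i = pvSkipB s g i := by
  intro f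
  induction f with
  | zero =>
      intro g i hf hg
      have hi : ¬ i < s.length := by omega
      rw [pvSkipB_of_ge s 0 i hi, pvSkipB_of_ge s g i hi]
  | succ f ih =>
      intro g i hf hg
      by_cases hi : i < s.length
      · obtain ⟨g', rfl⟩ : ∃ g', g = g' + 1 := ⟨g - 1, by omega⟩
        rw [pvSkipB, pvSkipB]
        simp only [dif_pos hi]
        split_ifs with h1 h2 h3 h4
        · rfl
        · have hinner : pvSkipB s f (i + 1) = pvSkipB s g' (i + 1) :=
            ih g' (i + 1) (by omega) (by omega)
          rw [← hinner]
          cases hm : pvSkipB s f (i + 1) with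
          | none => rfl
          | some j =>
              have hj := pvSkipB_gt s f (i + 1) j hm
              exact ih g' j (by omega) (by omega)
        · have hl : 1 ≤ ((s.drop i).take 3).length := by
            rcases h4 with hh | hh <;> simp [hh]
          have hff : pvFfwd s ((s.drop i).take 3) f (i + ((s.drop i).take 3).length)
              = pvFfwd s ((s.drop i).take 3) g' (i + ((s.drop i).take 3).length) :=
            pvFfwd_stable s _ f g' _ (by omega) (by omega)
          rw [hff]
          have hge := pvFfwd_ge s ((s.drop i).take 3) g' (i + ((s.drop i).take 3).length)
          exact ih g' _ (by omega) (by omega)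
        · have hl : [s[i]].length = 1 := by simp
          have hff : pvFfwd s [s[i]] f (i + [s[i]].length)
              = pvFfwd s [s[i]] g' (i + [s[i]].length) :=
            pvFfwd_stable s _ f g' _ (by omega) (by omega)
          rw [hff]
          have hge := pvFfwd_ge s [s[i]] g' (i + [s[i]].length)
          exact ih g' _ (by omega) (by omega)
        · exact ih g' (i + 1) (by omega) (by omega)
      · rw [pvSkipB_of_ge s _ i hi, pvSkipB_of_ge s g i hi]

theorem pvSpansAux_stable (s : List Char) : ∀ (f g i : Nat) (st : List Nat),
    s.length < f + i → s.length < g + i → pvSpansAux s f i st = pvSpansAux s g i st := by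
  intro f
  induction f with
  | zero =>
      intro g i st hf hg
      have hi : ¬ i < s.length := by omega
      rw [pvSpansAux_of_ge s 0 i st hi, pvSpansAux_of_ge s g i st hi]
  | succ f ih =>
      intro g i st hf hg
      by_cases hi : i < s.length
      · obtain ⟨g', rfl⟩ : ∃ g', g = g' + 1 := ⟨g - 1, by omega⟩
        rw [pvSpansAux.eq_def, pvSpansAux.eq_def]; simp only []
        simp only [dif_pos hi]
        split_ifs with h1 h2 h3 h4 h5
        · exact ih g' (i + 2) st (by omega) (by omega)
        · exact ih g' (i + 1) (i :: st) (by omega) (by omega)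
        · cases st with
          | nil => exact ih g' (i + 1) [] (by omega) (by omega)
          | cons j rest =>
              by_cases hr : rest = []
              · simp only [if_pos hr]
                rw [ih g' (i + 1) rest (by omega) (by omega)]
              · simp only [if_neg hr]
                exact ih g' (i + 1) rest (by omega) (by omega)
        · have hff : pvFfwd s ((s.drop i).take 3) f (i + 3)
              = pvFfwd s ((s.drop i).take 3) g' (i + 3) :=
            pvFfwd_stable s _ f g' (i + 3) (by omega) (by omega)
          rw [hff]
          have hge := pvFfwd_ge s ((s.drop i).take 3) g' (i + 3)
          exact ih g' _ st (by omega) (by omega)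
        · have hff : pvFfwd s [s[i]] f (i + 1) = pvFfwd s [s[i]] g' (i + 1) :=
            pvFfwd_stable s _ f g' (i + 1) (by omega) (by omega)
          rw [hff]
          have hge := pvFfwd_ge s [s[i]] g' (i + 1)
          exact ih g' _ st (by omega) (by omega)
        · exact ih g' (i + 1) st (by omega) (by omega)
        · exact ih g' (i + 1) st (by omega) (by omega)
      · rw [pvSpansAux_of_ge s _ i st hi, pvSpansAux_of_ge s g i st hi]

-- A's generator inside an expression = B's recursive skipper (at saturated fuel s.length+1):
-- a nonempty stack means we are inside an expression whose closing brace pvSkipB finds.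
theorem pvSpans_skip (s : List Char) : ∀ (f i j : Nat) (rest : List Nat),
    s.length < f + i →
    pvSpansAux s f i (j :: rest) =
      (match pvSkipB s (s.length + 1) i with
       | none => []
       | some e => if rest = [] then (j, e) :: pvSpansAux s (s.length + 1) e []
                   else pvSpansAux s (s.length + 1) e rest) := by
  intro f
  induction f with
  | zero =>
      intro i j rest hf
      have hi : ¬ i < s.length := by omega
      rw [pvSpansAux_of_ge s 0 i _ hi, pvSkipB_of_ge s _ i hi]
  | succ f ih =>
      intro i j rest hf
      by_cases hi : i < s.length
      case neg =>
        rw [pvSpansAux_of_ge s _ i _ hi, pvSkipB_of_ge s _ i hi]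
      case pos =>
      by_cases hb1 : s[i] = '}'
      · -- closing brace: the span (or the enclosing level) is reached
        have hb2 : ¬ s[i] = '{' := by rw [hb1]; decide
        have hskip : pvSkipB s (s.length + 1) i = some (i + 1) := by
          rw [pvSkipB]; simp [hi, hb1]
        rw [hskip, pvSpansAux]
        simp only [dif_pos hi, if_neg hb2, if_pos hb1]
        have hst := pvSpansAux_stable s f (s.length + 1) (i + 1)
        by_cases hr : rest = []
        · simp only [hr]
          rw [hst [] (by omega) (by omega)]
        · simp only [if_neg hr]
          rw [hst rest (by omega) (by omega)]
      · by_cases hb2 : s[i] = '{'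
        · -- nested expression: recurse, then continue at its end
          have hskip : pvSkipB s (s.length + 1) i =
              (match pvSkipB s (s.length + 1) (i + 1) with
               | none => none
               | some e => pvSkipB s (s.length + 1) e) := by
            rw [pvSkipB]
            simp only [dif_pos hi, if_neg hb1, if_pos hb2]
            rw [pvSkipB_stable s s.length (s.length + 1) (i + 1) (by omega) (by omega)]
            cases hm : pvSkipB s (s.length + 1) (i + 1) with
            | none => rfl
            | some e =>
                have he := pvSkipB_gt s _ _ _ hm
                show pvSkipB s s.length e = pvSkipB s (s.length + 1) e
                exact pvSkipB_stable s s.length (s.length + 1) e (by omega) (by omega)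
          rw [hskip, pvSpansAux]
          simp only [dif_pos hi, if_pos hb2]
          have hesc : ¬ ((j :: rest : List Nat) = [] ∧ s[i+1]? = some '{') := by simp
          rw [if_neg hesc]
          rw [ih (i + 1) i (j :: rest) (by omega)]
          cases hm : pvSkipB s (s.length + 1) (i + 1) with
          | none => rfl
          | some e =>
              have he := pvSkipB_gt s _ _ _ hm
              show (if j :: rest = [] then (i, e) :: pvSpansAux s (s.length + 1) e []
                    else pvSpansAux s (s.length + 1) e (j :: rest)) =
                  (match pvSkipB s (s.length + 1) e with
                   | none => []
                   | some e' => if rest = [] then (j, e') :: pvSpansAux s (s.length + 1) e' []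
                                else pvSpansAux s (s.length + 1) e' rest)
              rw [if_neg (by simp : ¬ ((j :: rest : List Nat) = []))]
              rw [pvSpansAux_stable s (s.length + 1) f e (j :: rest) (by omega) (by omega)]
              rw [ih e j rest (by omega)]
        · -- inside the expression: fast-forward through strings / ordinary chars
          by_cases h3 : (s.drop i).take 3 = ['\'', '\'', '\''] ∨ (s.drop i).take 3 = ['"', '"', '"']
          · have hq : s[i] = '\'' ∨ s[i] = '"' := by
              rcases h3 with hh | hh
              · exact Or.inl (pvTake3_head s i hi _ _ _ hh)
              · exact Or.inr (pvTake3_head s i hi _ _ _ hh)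
            have hd3 : ((s.drop i).take 3).length = 3 := by
              rcases h3 with hh | hh <;> rw [hh] <;> rfl
            have hffst : pvFfwd s ((s.drop i).take 3) f (i + 3)
                = pvFfwd s ((s.drop i).take 3) s.length (i + 3) :=
              pvFfwd_stable s _ f s.length (i + 3) (by omega) (by omega)
            have hge := pvFfwd_ge s ((s.drop i).take 3) s.length (i + 3)
            have hskip : pvSkipB s (s.length + 1) i =
                pvSkipB s (s.length + 1)
                  (pvFfwd s ((s.drop i).take 3) s.length (i + 3) + 3) := by
              rw [pvSkipB]
              simp only [dif_pos hi, if_neg hb1, if_neg hb2, if_pos hq, if_pos h3, hd3]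
              exact pvSkipB_stable s s.length (s.length + 1) _ (by omega) (by omega)
            rw [hskip, pvSpansAux]
            simp only [dif_pos hi, if_neg hb1, if_neg hb2, if_pos h3,
              ne_eq, reduceCtorEq, not_false_eq_true]
            rw [hffst]
            exact ih _ j rest (by omega)
          · by_cases hq : s[i] = '\'' ∨ s[i] = '"'
            · have hffst : pvFfwd s [s[i]] f (i + 1)
                  = pvFfwd s [s[i]] s.length (i + 1) :=
                pvFfwd_stable s _ f s.length (i + 1) (by omega) (by omega)
              have hge := pvFfwd_ge s [s[i]] s.length (i + 1)
              have hskip : pvSkipB s (s.length + 1) i =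
                  pvSkipB s (s.length + 1) (pvFfwd s [s[i]] s.length (i + 1) + 1) := by
                rw [pvSkipB]
                simp only [dif_pos hi, if_neg hb1, if_neg hb2, if_pos hq, if_neg h3,
                  List.length_cons, List.length_nil]
                exact pvSkipB_stable s s.length (s.length + 1) _ (by omega) (by omega)
              rw [hskip, pvSpansAux]
              simp only [dif_pos hi, if_neg hb1, if_neg hb2, if_neg h3, if_pos hq,
                ne_eq, reduceCtorEq, not_false_eq_true]
              rw [hffst]
              exact ih _ j rest (by omega)
            · have hskip : pvSkipB s (s.length + 1) i = pvSkipB s (s.length + 1) (i + 1) := by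
                rw [pvSkipB]
                simp only [dif_pos hi, if_neg hb1, if_neg hb2, if_neg hq]
                exact pvSkipB_stable s s.length (s.length + 1) (i + 1) (by omega) (by omega)
              rw [hskip, pvSpansAux]
              simp only [dif_pos hi, if_neg hb1, if_neg hb2, if_neg h3, if_neg hq,
                ne_eq, reduceCtorEq, not_false_eq_true]
              exact ih (i + 1) j rest (by omega)

-- B's top-level emitter produces exactly the parts A assembles from the span list
theorem pvEmit_eq (s oq nq : List Char) : ∀ (f i seg : Nat) (out : List (List Char)),
    s.length < f + i →
    pvEmitB s oq nq f i seg out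
      = out ++ pvBuild s oq nq seg (pvSpansAux s (s.length + 1) i []) := by
  intro f
  induction f with
  | zero =>
      intro i seg out hf
      have hi : ¬ i < s.length := by omega
      rw [pvSpansAux_of_ge s _ i _ hi]
      simp [pvEmitB, pvBuild]
  | succ f ih =>
      intro i seg out hf
      by_cases hi : i < s.length
      case neg =>
        rw [pvSpansAux_of_ge s _ i _ hi]
        simp [pvEmitB, pvBuild, hi]
      case pos =>
      rw [pvEmitB]
      simp only [dif_pos hi]
      by_cases hb1 : s[i] = '{'
      · by_cases hesc : s[i+1]? = some '{'
        · -- escaped '{{' outside any expression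
          have hsp : pvSpansAux s (s.length + 1) i [] = pvSpansAux s (s.length + 1) (i + 2) [] := by
            rw [pvSpansAux]
            simp only [dif_pos hi, if_pos hb1]
            rw [if_pos ⟨trivial, hesc⟩]
            exact pvSpansAux_stable s s.length (s.length + 1) (i + 2) [] (by omega) (by omega)
          rw [hsp]
          simp only [if_pos hb1, if_pos hesc]
          exact ih (i + 2) seg out (by omega)
        · -- real expression start
          have hsp : pvSpansAux s (s.length + 1) i []
              = (match pvSkipB s (s.length + 1) (i + 1) with
                 | none => []
                 | some e => (i, e) :: pvSpansAux s (s.length + 1) e []) := by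
            rw [pvSpansAux]
            simp only [dif_pos hi, if_pos hb1]
            rw [if_neg (by simp [hesc])]
            rw [pvSpans_skip s s.length (i + 1) i [] (by omega)]
            cases hm : pvSkipB s (s.length + 1) (i + 1) with
            | none => rfl
            | some e => simp
          rw [hsp]
          simp only [if_pos hb1, if_neg hesc]
          rw [pvSkipB_stable s f (s.length + 1) (i + 1) (by omega) (by omega)]
          cases hm : pvSkipB s (s.length + 1) (i + 1) with
          | none => simp [pvBuild]
          | some e =>
              have he := pvSkipB_gt s _ _ _ hm
              show pvEmitB s oq nq f e e
                    (out ++ [PySem.List.slice s (some (seg : Int)) (some (i : Int)),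
                             PySem.Chars.replace (PySem.List.slice s (some (i : Int)) (some (e : Int))) oq nq])
                  = out ++ pvBuild s oq nq seg ((i, e) :: pvSpansAux s (s.length + 1) e [])
              rw [ih e e _ (by omega)]
              simp [pvBuild]
      · -- any other character is copied verbatim at top level
        have hsp : pvSpansAux s (s.length + 1) i [] = pvSpansAux s (s.length + 1) (i + 1) [] := by
          rw [pvSpansAux]
          simp only [dif_pos hi, if_neg hb1]
          by_cases hb2 : s[i] = '}'
          · simp only [if_pos hb2]
            exact pvSpansAux_stable s s.length (s.length + 1) (i + 1) [] (by omega) (by omega)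
          · simp only [if_neg hb2, ne_eq, not_true_eq_false]
            exact pvSpansAux_stable s s.length (s.length + 1) (i + 1) [] (by omega) (by omega)
        rw [hsp]
        simp only [if_neg hb1]
        exact ih (i + 1) seg out (by omega)

-- ===== VERDICT (by name: the statement is the Claim_ definition above) =====
theorem toggle_fexpr_quotes_py_spec : Claim_equal_toggle_fexpr_quotes_py := by
  intro fstring old_quote _
  unfold Spec_toggle_fexpr_quotes_py toggle_fexpr_quotes_py toggle_fexpr_quotes_py_alt
  simp only []
  rw [pvFold_eq_build]
  rw [pvEmit_eq fstring.toList old_quote.toList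
        (if old_quote = "\"" then "'" else "\"").toList (fstring.toList.length + 1) 0 0 [] (by omega)]
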